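-- pv_equiv track=rewrite | github.com/Kathan03/Pulse-Agentic_IDE | src/agents/master_graph.py | _fallback_summarize
-- ===== SOURCE A (Python) =====
-- from typing import Literal, Optional, Dict, Any, List
--
-- def _fallback_summarize(messages: List[Dict[str, Any]]) -> str:
--     """
--     Fallback summarization when LLM is unavailable.
--
--     Simple concatenation with truncation (original behavior).
--     """
--     summary_lines = []
--     for msg in messages:
--         role = msg.get("role", "unknown")
--         content = msg.get("content", "")
--         if content:
--             summary_lines.append(f"{role}: {content[:100]}...")
--
--     return "\n".join(summary_lines[-5:])  # Keep last 5 entries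
-- ===== SOURCE B (Python) =====
-- def _fallback_summarize(messages):
--     """Scan from the end, keeping only the last 5 formatted lines; reverse at the end."""
--     buf = []
--     for msg in reversed(messages):
--         role = msg.get("role", "unknown")
--         content = msg.get("content", "")
--         if content:
--             buf.append(f"{role}: {content[:100]}...")
--             if len(buf) == 5:
--                 break
--     return "\n".join(reversed(buf))
-- ===== Notes on version B (the rewrite author's own statement) =====
-- stated objective: alternative
-- what changed: Instead of formatting every message into a full list and slicing its last 5, B scans the messages from the end, collecting at most 5 formatted lines into a bounded buffer with an early break, then reverses the buffer; it never materialises more than 5 lines.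
import Mathlib
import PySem

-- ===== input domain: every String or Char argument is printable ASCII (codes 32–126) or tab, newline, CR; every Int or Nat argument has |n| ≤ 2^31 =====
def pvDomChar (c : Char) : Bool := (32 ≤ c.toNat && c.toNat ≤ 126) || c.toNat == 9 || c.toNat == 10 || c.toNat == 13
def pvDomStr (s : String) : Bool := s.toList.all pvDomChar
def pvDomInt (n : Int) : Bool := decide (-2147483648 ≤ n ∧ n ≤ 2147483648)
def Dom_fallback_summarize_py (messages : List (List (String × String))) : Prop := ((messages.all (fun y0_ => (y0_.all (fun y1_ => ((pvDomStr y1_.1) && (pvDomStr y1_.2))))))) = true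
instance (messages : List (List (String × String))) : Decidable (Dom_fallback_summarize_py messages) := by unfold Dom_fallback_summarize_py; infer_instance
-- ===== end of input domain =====

-- B replaces "format all messages, then slice the last 5" by a reverse scan that keeps a
-- bounded buffer of at most 5 formatted lines with an early break (objective: alternative).

-- msg.get(k, d) on an association list: first match wins (shared by both ports, as both Pythons call msg.get)
def pvGetD (msg : List (String × String)) (k d : String) : String :=
  match msg with
  | [] => d
  | (k', v) :: rest => if k' == k then v else pvGetD rest k d

-- ===== PORT A =====
def fallback_summarize_py (messages : List (List (String × String))) : String :=
  let summary_lines := messages.foldl (fun acc msg =>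
      let role := pvGetD msg "role" "unknown"
      let content := pvGetD msg "content" ""
      if content = "" then acc
      else acc ++ [role ++ ": " ++ PySem.Str.slice content none (some 100) ++ "..."]) []
  PySem.Str.join "\n" (PySem.List.slice summary_lines (some (-5)) none)

-- ===== PORT B =====
-- the loop 'for msg in reversed(messages): … break' with its buffer
def pvCollect (msgs : List (List (String × String))) (buf : List String) : List String :=
  match msgs with
  | [] => buf
  | msg :: rest =>
    let role := pvGetD msg "role" "unknown"
    let content := pvGetD msg "content" ""
    if content = "" then pvCollect rest buf
    else
      let buf' := buf ++ [role ++ ": " ++ PySem.Str.slice content none (some 100) ++ "..."]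
      if buf'.length = 5 then buf' else pvCollect rest buf'

def fallback_summarize_py_alt (messages : List (List (String × String))) : String :=
  PySem.Str.join "\n" (pvCollect messages.reverse []).reverse

-- ===== PRECONDITION & SPEC =====
def Spec_fallback_summarize_py (messages : List (List (String × String))) (out : String) : Prop := out = fallback_summarize_py_alt messages
instance (messages : List (List (String × String))) (out : String) : Decidable (Spec_fallback_summarize_py messages out) := by unfold Spec_fallback_summarize_py; infer_instance

-- ===== CLAIM (what is proved, stated in full; the proofs are below) =====
def Claim_equal_fallback_summarize_py : Prop := ∀ (messages : List (List (String × String))), Dom_fallback_summarize_py messages → Spec_fallback_summarize_py messages (fallback_summarize_py messages)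

-- ===== LEMMAS AND PROOFS =====

-- the formatted line a message contributes, if any
def pvLine? (msg : List (String × String)) : Option String :=
  let content := pvGetD msg "content" ""
  if content = "" then none
  else some (pvGetD msg "role" "unknown" ++ ": " ++ PySem.Str.slice content none (some 100) ++ "...")

theorem pvFoldl_eq_filterMap (ms : List (List (String × String))) (acc : List String) :
    ms.foldl (fun acc msg =>
      let role := pvGetD msg "role" "unknown"
      let content := pvGetD msg "content" ""
      if content = "" then acc
      else acc ++ [role ++ ": " ++ PySem.Str.slice content none (some 100) ++ "..."]) acc
    = acc ++ ms.filterMap pvLine? := by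
  induction ms generalizing acc with
  | nil => simp
  | cons m rest ih =>
    by_cases h : pvGetD m "content" "" = ""
    · have hl : pvLine? m = none := by simp [pvLine?, h]
      simp only [List.foldl_cons, List.filterMap_cons, hl, h]
      simp [ih]
    · have hl : pvLine? m = some (pvGetD m "role" "unknown" ++ ": " ++ PySem.Str.slice (pvGetD m "content" "") none (some 100) ++ "...") := by
        simp [pvLine?, h]
      simp only [List.foldl_cons, List.filterMap_cons, hl, h]
      simp [ih]

theorem pvCollect_eq_take (ms : List (List (String × String))) (buf : List String)
    (h : buf.length < 5) :
    pvCollect ms buf = buf ++ (ms.filterMap pvLine?).take (5 - buf.length) := by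
  induction ms generalizing buf with
  | nil => simp [pvCollect]
  | cons m rest ih =>
    by_cases hc : pvGetD m "content" "" = ""
    · have hl : pvLine? m = none := by simp [pvLine?, hc]
      simp only [pvCollect, hc, List.filterMap_cons, hl]
      exact ih buf h
    · have hl : pvLine? m = some (pvGetD m "role" "unknown" ++ ": " ++ PySem.Str.slice (pvGetD m "content" "") none (some 100) ++ "...") := by
        simp [pvLine?, hc]
      simp only [pvCollect, hc, List.filterMap_cons, hl]
      by_cases h5 : buf.length + 1 = 5
      · simp only [List.length_append, List.length_cons, List.length_nil, h5]
        have ht : 5 - buf.length = 1 := by omega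
        simp [ht]
      · have hlt : (buf ++ [pvGetD m "role" "unknown" ++ ": " ++ PySem.Str.slice (pvGetD m "content" "") none (some 100) ++ "..."]).length < 5 := by
          simp; omega
        simp only [List.length_append, List.length_cons, List.length_nil, h5, ih _ hlt]
        have ht : 5 - (buf.length + 1) = (5 - buf.length) - 1 := by omega
        have h2 : 5 - buf.length = ((5 - buf.length) - 1) + 1 := by omega
        rw [List.length_append] at *
        simp only [List.length_cons, List.length_nil, Nat.zero_add, ht] at *
        rw [h2, List.take_succ_cons]
        simp

-- ===== VERDICT (by name: the statement is the Claim_ definition above) =====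
theorem fallback_summarize_py_spec : Claim_equal_fallback_summarize_py := by
  intro messages _
  unfold Spec_fallback_summarize_py fallback_summarize_py fallback_summarize_py_alt
  rw [pvFoldl_eq_filterMap, pvCollect_eq_take _ _ (by simp)]
  simp only [List.nil_append, List.filterMap_reverse]
  congr 1
  rw [PySem.List.slice_from_neg_ofNat _ 5 (by omega)]
  rw [List.take_reverse, List.reverse_reverse]
  simp
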